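-- pv_equiv track=rewrite | github.com/tomy20030812/langpatch | src/langpatch/diff_utils.py | extract_and_fix_hunks
-- ===== SOURCE A (Python) =====
-- def extract_and_fix_hunks(text: str) -> str:
--     """
--     提取并修复 hunk 内容：
--
--     规则：
--     - 只处理 @@ 之后的内容
--     - 允许的前缀：@@, +, -, " "
--     - 其他非空行：自动补一个前导空格，视为上下文行
--     - 空行直接丢弃
--     """
--     lines = text.splitlines()
--     hunks: list[str] = []
--
--     in_hunk = False
--     has_content = False
--
--     for line in lines:
--         if line.startswith("@@"):
--             in_hunk = True
--             hunks.append(line)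
--             continue
--
--         if not in_hunk:
--             continue
--
--         # hunk 内处理
--         if not line.strip():
--             # 空行直接丢弃，避免制造非法上下文
--             continue
--
--         if line.startswith(("+", "-", " ")):
--             hunks.append(line)
--             if not line.startswith("@@"):
--                 has_content = True
--         else:
--             # 自动补 diff 上下文前缀空格
--             hunks.append(" " + line)
--             has_content = True
--
--     if not has_content:
--         return ""
--
--     return "\n".join(hunks).rstrip() + "\n"
-- ===== SOURCE B (Python) =====
-- def extract_and_fix_hunks(text: str) -> str:
--     lines = text.splitlines()
--     # drop everything before the first '@@' header
--     while lines and not lines[0].startswith("@@"):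
--         lines = lines[1:]
--     if not lines:
--         return ""
--     # group the remaining lines into hunk blocks: (header, normalized body)
--     blocks: list[tuple[str, list[str]]] = []
--     header, body = lines[0], []
--     for line in lines[1:]:
--         if line.startswith("@@"):
--             blocks.append((header, body))
--             header, body = line, []
--         elif line.strip():
--             body.append(line if line[0] in "+- " else " " + line)
--     blocks.append((header, body))
--     if not any(body for _, body in blocks):
--         return ""
--     flat = [s for header, body in blocks for s in (header, *body)]
--     return "\n".join(flat).rstrip() + "\n"
-- ===== Notes on version B (the rewrite author's own statement) =====
-- stated objective: alternative
-- what changed: Replaces A's single pass with in_hunk/has_content flags by first dropping everything before the first '@@' header, then grouping the remaining lines into (header, normalized body) blocks, deciding emptiness from the blocks, and flattening them for the join.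
import Mathlib
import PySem

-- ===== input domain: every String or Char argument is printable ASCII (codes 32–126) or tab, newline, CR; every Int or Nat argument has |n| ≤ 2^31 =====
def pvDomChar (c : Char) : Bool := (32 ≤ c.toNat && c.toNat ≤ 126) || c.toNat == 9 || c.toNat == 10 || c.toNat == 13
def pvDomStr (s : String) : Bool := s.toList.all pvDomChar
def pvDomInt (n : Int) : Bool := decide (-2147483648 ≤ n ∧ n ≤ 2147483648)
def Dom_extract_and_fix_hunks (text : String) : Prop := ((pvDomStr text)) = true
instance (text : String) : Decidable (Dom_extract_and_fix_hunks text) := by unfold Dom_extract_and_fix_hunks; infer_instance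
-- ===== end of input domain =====

-- B re-groups the hunk lines into (header, body) blocks after dropping the pre-'@@' prefix,
-- instead of A's single pass with in_hunk/has_content flags; objective: alternative decomposition, same cost.

-- ===== PORT A =====
-- the body of A's 'for line in lines' loop (state: hunks, in_hunk, has_content)
def pvStepA (s : List (List Char) × Bool × Bool) (line : List Char) : List (List Char) × Bool × Bool :=
  if PySem.Chars.startswith line ['@', '@'] then
    (s.1 ++ [line], true, s.2.2)
  else if !s.2.1 then s
  else if PySem.Chars.strip line = [] then s
  else if PySem.Chars.startswith line ['+'] || PySem.Chars.startswith line ['-']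
          || PySem.Chars.startswith line [' '] then
    (s.1 ++ [line], s.2.1, if !PySem.Chars.startswith line ['@', '@'] then true else s.2.2)
  else
    (s.1 ++ [[' '] ++ line], s.2.1, true)

def extract_and_fix_hunks (text : String) : String :=
  let lines := PySem.Chars.splitlines text.toList
  let st := lines.foldl pvStepA ([], false, false)
  if st.2.2 = false then ""
  else String.ofList (PySem.Chars.rstrip (PySem.Chars.join ['\n'] st.1) ++ ['\n'])

-- ===== PORT B =====
-- Source B's 'while lines and not lines[0].startswith("@@"): lines = lines[1:]' loop
def pvDropToHeader : List (List Char) → List (List Char)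
  | [] => []
  | l :: ls => if PySem.Chars.startswith l ['@', '@'] then l :: ls else pvDropToHeader ls

-- the body of Source B's 'for line in lines[1:]' loop (state: blocks, header, body)
def pvStepB (s : List (List Char × List (List Char)) × List Char × List (List Char))
    (line : List Char) : List (List Char × List (List Char)) × List Char × List (List Char) :=
  if PySem.Chars.startswith line ['@', '@'] then
    (s.1 ++ [(s.2.1, s.2.2)], line, [])
  else if PySem.Chars.strip line ≠ [] then
    (s.1, s.2.1, s.2.2 ++
      [if PySem.List.pyGet? line 0 == some '+' || PySem.List.pyGet? line 0 == some '-'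
          || PySem.List.pyGet? line 0 == some ' ' then line else [' '] ++ line])
  else s

def extract_and_fix_hunks_alt (text : String) : String :=
  match pvDropToHeader (PySem.Chars.splitlines text.toList) with
  | [] => ""
  | hdr :: rest =>
    let st := rest.foldl pvStepB ([], hdr, [])
    let blocks := st.1 ++ [(st.2.1, st.2.2)]
    if !(blocks.any fun b => !b.2.isEmpty) then ""
    else String.ofList (PySem.Chars.rstrip
      (PySem.Chars.join ['\n'] (blocks.flatMap fun b => b.1 :: b.2)) ++ ['\n'])

-- ===== PRECONDITION & SPEC =====
def Spec_extract_and_fix_hunks (text : String) (out : String) : Prop := out = extract_and_fix_hunks_alt text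
instance (text : String) (out : String) : Decidable (Spec_extract_and_fix_hunks text out) := by unfold Spec_extract_and_fix_hunks; infer_instance

-- ===== CLAIM (what is proved, stated in full; the proofs are below) =====
def Claim_equal_extract_and_fix_hunks : Prop := ∀ (text : String), Dom_extract_and_fix_hunks text → Spec_extract_and_fix_hunks text (extract_and_fix_hunks text)

-- ===== LEMMAS AND PROOFS =====
def pvIsHdr (l : List Char) : Bool := PySem.Chars.startswith l ['@', '@']
def pvPM (l : List Char) : Bool :=
  PySem.Chars.startswith l ['+'] || PySem.Chars.startswith l ['-'] || PySem.Chars.startswith l [' ']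
def pvKeep (l : List Char) : Bool := !decide (PySem.Chars.strip l = [])
def pvNorm (l : List Char) : List Char := if pvPM l then l else [' '] ++ l

-- the normalized line stream both loops emit while inside a hunk
def pvSegs : List (List Char) → List (List Char)
  | [] => []
  | l :: ls =>
    if pvIsHdr l then l :: pvSegs ls
    else if pvKeep l then pvNorm l :: pvSegs ls
    else pvSegs ls

def pvContent (ls : List (List Char)) : Bool := ls.any fun l => !pvIsHdr l && pvKeep l

def pvFlat (bs : List (List Char × List (List Char))) : List (List Char) :=
  bs.flatMap fun b => b.1 :: b.2

-- Source B tests line[0] where A tests startswith: equal for every line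
theorem pvHead_eq_startswith (l : List Char) (c : Char) :
    (PySem.List.pyGet? l 0 == some c) = PySem.Chars.startswith l [c] := by
  cases l with
  | nil => simp [PySem.List.pyGet?, PySem.Chars.startswith]
  | cons a t =>
    simp [PySem.List.pyGet?, PySem.Chars.startswith, PySem.List.pyIdx?, List.isPrefixOf, eq_comm]

-- A's loop once in_hunk is set
theorem foldA_in (ls : List (List Char)) (acc : List (List Char)) (hc : Bool) :
    ls.foldl pvStepA (acc, true, hc) = (acc ++ pvSegs ls, true, hc || pvContent ls) := by
  induction ls generalizing acc hc with
  | nil => simp [pvSegs, pvContent]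
  | cons l ls ih =>
    by_cases hh : PySem.Chars.startswith l ['@', '@']
    · simp [pvStepA, hh, pvSegs, pvIsHdr, pvContent, ih]
    · by_cases hk : PySem.Chars.strip l = []
      · simp [pvStepA, hh, hk, pvSegs, pvIsHdr, pvKeep, pvContent, ih]
      · by_cases hp : (PySem.Chars.startswith l ['+'] || PySem.Chars.startswith l ['-']
          || PySem.Chars.startswith l [' ']) = true
        · simp [pvStepA, hh, hk, hp, pvSegs, pvIsHdr, pvKeep, pvNorm, pvPM, pvContent, ih]
        · simp [pvStepA, hh, hk, hp, pvSegs, pvIsHdr, pvKeep, pvNorm, pvPM, pvContent, ih]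

-- A's loop from the initial state: nothing happens until the first '@@' line
theorem foldA_init (ls : List (List Char)) :
    ls.foldl pvStepA ([], false, false) =
      (match pvDropToHeader ls with
       | [] => ([], false, false)
       | hdr :: rest => (hdr :: pvSegs rest, true, pvContent rest)) := by
  induction ls with
  | nil => simp [pvDropToHeader]
  | cons l ls ih =>
    by_cases hh : PySem.Chars.startswith l ['@', '@']
    · simp [pvStepA, hh, pvDropToHeader, foldA_in]
    · simp [pvStepA, hh, pvDropToHeader, ih]

-- B's grouped blocks flatten to the same line stream
theorem foldB_flat (ls : List (List Char)) (bs : List (List Char × List (List Char)))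
    (hdr : List Char) (bod : List (List Char)) :
    pvFlat ((ls.foldl pvStepB (bs, hdr, bod)).1 ++
        [((ls.foldl pvStepB (bs, hdr, bod)).2.1, (ls.foldl pvStepB (bs, hdr, bod)).2.2)]) =
      pvFlat (bs ++ [(hdr, bod)]) ++ pvSegs ls := by
  induction ls generalizing bs hdr bod with
  | nil => simp [pvSegs]
  | cons l ls ih =>
    rw [List.foldl_cons]
    by_cases hh : PySem.Chars.startswith l ['@', '@']
    · rw [show pvStepB (bs, hdr, bod) l = (bs ++ [(hdr, bod)], l, []) by simp [pvStepB, hh]]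
      rw [ih]
      simp [pvFlat, pvSegs, pvIsHdr, hh]
    · by_cases hk : PySem.Chars.strip l = []
      · rw [show pvStepB (bs, hdr, bod) l = (bs, hdr, bod) by simp [pvStepB, hh, hk]]
        rw [ih]
        simp [pvSegs, pvIsHdr, hh, pvKeep, hk]
      · rw [show pvStepB (bs, hdr, bod) l = (bs, hdr, bod ++ [pvNorm l]) by
          simp [pvStepB, hh, hk, pvNorm, pvPM, pvHead_eq_startswith]]
        rw [ih]
        simp [pvFlat, pvSegs, pvIsHdr, hh, pvKeep, hk]

-- B's 'some block has a nonempty body' is A's has_content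
theorem foldB_any (ls : List (List Char)) (bs : List (List Char × List (List Char)))
    (hdr : List Char) (bod : List (List Char)) :
    (((ls.foldl pvStepB (bs, hdr, bod)).1 ++
        [((ls.foldl pvStepB (bs, hdr, bod)).2.1, (ls.foldl pvStepB (bs, hdr, bod)).2.2)]).any
        fun b => !b.2.isEmpty) =
      (((bs ++ [(hdr, bod)]).any fun b => !b.2.isEmpty) || pvContent ls) := by
  induction ls generalizing bs hdr bod with
  | nil => simp [pvContent]
  | cons l ls ih =>
    rw [List.foldl_cons]
    by_cases hh : PySem.Chars.startswith l ['@', '@']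
    · rw [show pvStepB (bs, hdr, bod) l = (bs ++ [(hdr, bod)], l, []) by simp [pvStepB, hh]]
      rw [ih]
      simp [pvContent, pvIsHdr, hh, Bool.or_comm, Bool.or_left_comm]
    · by_cases hk : PySem.Chars.strip l = []
      · rw [show pvStepB (bs, hdr, bod) l = (bs, hdr, bod) by simp [pvStepB, hh, hk]]
        rw [ih]
        simp [pvContent, pvIsHdr, hh, pvKeep, hk]
      · rw [show pvStepB (bs, hdr, bod) l = (bs, hdr, bod ++ [pvNorm l]) by
          simp [pvStepB, hh, hk, pvNorm, pvPM, pvHead_eq_startswith]]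
        rw [ih]
        simp [pvContent, pvIsHdr, hh, pvKeep, hk, Bool.or_comm, Bool.or_left_comm]

-- ===== VERDICT (by name: the statement is the Claim_ definition above) =====
theorem extract_and_fix_hunks_spec : Claim_equal_extract_and_fix_hunks := by
  intro text _
  unfold Spec_extract_and_fix_hunks extract_and_fix_hunks extract_and_fix_hunks_alt
  simp only [foldA_init]
  cases h : pvDropToHeader (PySem.Chars.splitlines text.toList) with
  | nil => simp
  | cons hdr rest =>
    have hf := foldB_flat rest [] hdr []
    have ha := foldB_any rest [] hdr []
    simp only [pvFlat, List.nil_append, List.flatMap_cons, List.flatMap_nil,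
      List.append_nil, List.any_cons, List.any_nil, List.isEmpty_nil] at hf ha
    simp [hf, ha, pvContent]
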